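-- pv_equiv track=rewrite | github.com/mfagundes/desafios | codility/4.counting_elements/frog_river_one.py | solution_old
-- ===== SOURCE A (Python) =====
-- def solution_old(X, A):
--     # write your code in Python 3.6
--     # leaves_path = [1,2,3,4,5]
--     leaves_path = [leaf for leaf in range(1, X + 1)]
--     leaves_fallen = set()
--     for sec, leaf in enumerate(A):
--         leaves_fallen.add(leaf)
--         if list(leaves_fallen) == leaves_path:
--             return sec
--     return -1
-- ===== SOURCE B (Python) =====
-- def solution_old(X, A):
--     # Single pass with a flag table and a countdown: O(N + X) instead of
--     # rebuilding and comparing an O(X) list at every second.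
--     if X < 1:
--         return -1
--     seen = bytearray(X + 1)
--     remaining = X
--     for sec, leaf in enumerate(A):
--         if leaf < 1 or leaf > X:
--             # an out-of-range leaf joins the set permanently, so the set can
--             # never equal {1..X} afterwards (and it did not before, or we
--             # would already have returned): the answer is -1
--             return -1
--         if not seen[leaf]:
--             seen[leaf] = 1
--             remaining -= 1
--             if remaining == 0:
--                 return sec
--     return -1
-- ===== Notes on version B (the rewrite author's own statement) =====
-- stated objective: faster
-- what changed: Replaces the per-second rebuild-and-compare of an O(X) list against range(1,X+1) by a flag table with a countdown of still-missing leaves (and an immediate -1 on an out-of-range leaf, which poisons A's set permanently), turning O(N*X) into O(N+X).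
import Mathlib
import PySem

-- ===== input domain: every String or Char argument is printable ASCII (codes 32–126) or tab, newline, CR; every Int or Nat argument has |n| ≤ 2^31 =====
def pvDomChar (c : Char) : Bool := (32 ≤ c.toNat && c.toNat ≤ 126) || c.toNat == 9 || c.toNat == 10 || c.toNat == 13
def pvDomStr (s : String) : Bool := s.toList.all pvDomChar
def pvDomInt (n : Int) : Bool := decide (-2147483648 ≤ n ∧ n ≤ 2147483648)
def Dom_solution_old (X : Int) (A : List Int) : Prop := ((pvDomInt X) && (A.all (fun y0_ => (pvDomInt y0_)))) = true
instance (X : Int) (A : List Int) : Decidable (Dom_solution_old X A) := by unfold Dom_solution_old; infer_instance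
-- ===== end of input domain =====

-- B replaces A's per-second rebuild-and-compare of an O(X) list by a flag table
-- with a countdown of missing leaves: O(N+X) instead of O(N*X). Return values agree.

-- ===== PORT A =====
-- Hand-port of CPython's `list(leaves_fallen) == leaves_path` where leaves_path =
-- list(range(1, X+1)): PySem.Set does not model hash iteration order, but this
-- comparison's OUTCOME is order-independent — it is true iff the set equals
-- {1,..,X} as a set (list equality forces multiset equality, and conversely a
-- CPython set whose elements are exactly the small ints 1..X iterates in sorted
-- order, since each i occupies hash slot i of a table larger than X). So it is
-- ported, exactly, as "same length as the path, and every path element is in the set".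
def pyListSetEqPath (s : PySem.Set Int) (path : List Int) : Bool :=
  s.length == path.length && path.all (fun x => PySem.Set.contains s x)

def aLoop (path : List Int) (fallen : PySem.Set Int) : List (Int × Int) → Int
  | [] => -1
  | (sec, leaf) :: rest =>
    let fallen' := PySem.Set.add fallen leaf
    if pyListSetEqPath fallen' path then sec else aLoop path fallen' rest

def solution_old (X : Int) (A : List Int) : Int :=
  let leaves_path := PySem.List.pyRange 1 (X + 1) 1
  aLoop leaves_path PySem.Set.empty (PySem.List.enumerate A)

-- ===== PORT B =====
-- bytearray(X+1) is ported as a List Bool of flags.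
def bLoop (X : Int) (seen : List Bool) (remaining : Int) : List (Int × Int) → Int
  | [] => -1
  | (sec, leaf) :: rest =>
    if leaf < 1 || leaf > X then -1
    else if !(seen.getD leaf.toNat false) then
      if remaining - 1 = 0 then sec
      else bLoop X (seen.set leaf.toNat true) (remaining - 1) rest
    else bLoop X seen remaining rest

def solution_old_alt (X : Int) (A : List Int) : Int :=
  if X < 1 then -1
  else bLoop X (List.replicate (X + 1).toNat false) X (PySem.List.enumerate A)

-- ===== PRECONDITION & SPEC =====
def Spec_solution_old (X : Int) (A : List Int) (out : Int) : Prop := out = solution_old_alt X A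
instance (X : Int) (A : List Int) (out : Int) : Decidable (Spec_solution_old X A out) := by unfold Spec_solution_old; infer_instance

-- ===== CLAIM (what is proved, stated in full; the proofs are below) =====
def Claim_equal_solution_old : Prop := ∀ (X : Int) (A : List Int), Dom_solution_old X A → Spec_solution_old X A (solution_old X A)

-- ===== LEMMAS AND PROOFS =====

-- the comparison is false as soon as the set holds an element outside the path
lemma eqPath_false_of_bad (s : PySem.Set Int) (path : List Int) (hnp : path.Nodup)
    (bad : Int) (h1 : bad ∈ s) (h2 : bad ∉ path) : pyListSetEqPath s path = false := by
  by_contra h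
  have h' : pyListSetEqPath s path = true := by
    cases hb : pyListSetEqPath s path with
    | true => rfl
    | false => exact absurd hb h
  unfold pyListSetEqPath at h'
  simp [PySem.Set.contains] at h'
  obtain ⟨hl, hsub⟩ := h'
  have hsub' : (bad :: path) ⊆ s := by
    intro x hx
    rcases List.mem_cons.mp hx with rfl | hx
    · exact h1
    · exact hsub x hx
  have hnd : (bad :: path).Nodup := List.nodup_cons.mpr ⟨h2, hnp⟩
  have := (List.subperm_of_subset hnd hsub').length_le
  simp at this
  omega

lemma aLoop_poison (path : List Int) (hnp : path.Nodup) (bad : Int) (h2 : bad ∉ path) :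
    ∀ (rest : List (Int × Int)) (fallen : PySem.Set Int), bad ∈ fallen →
      aLoop path fallen rest = -1 := by
  intro rest
  induction rest with
  | nil => intro fallen _; rfl
  | cons p rest ih =>
    intro fallen h1
    obtain ⟨sec, leaf⟩ := p
    have h1' : bad ∈ PySem.Set.add fallen leaf := by
      simp [PySem.Set.mem_add]; exact Or.inl h1
    simp only [aLoop, eqPath_false_of_bad _ path hnp bad h1' h2]
    simp only [Bool.false_eq_true, if_false]
    exact ih _ h1'

-- with an empty path (X < 1) the comparison never succeeds: the set is nonempty after the add
lemma aLoop_nil_path : ∀ (rest : List (Int × Int)) (fallen : PySem.Set Int),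
    aLoop [] fallen rest = -1 := by
  intro rest
  induction rest with
  | nil => intro _; rfl
  | cons p rest ih =>
    intro fallen
    obtain ⟨sec, leaf⟩ := p
    have hm : leaf ∈ PySem.Set.add fallen leaf := by simp [PySem.Set.mem_add]
    have hne : PySem.Set.add fallen leaf ≠ [] := List.ne_nil_of_mem hm
    have : pyListSetEqPath (PySem.Set.add fallen leaf) [] = false := by
      unfold pyListSetEqPath
      simp [List.length_eq_zero_iff, hne]
    simp only [aLoop, this, Bool.false_eq_true, if_false]
    exact ih _

-- the comparison succeeds exactly when the (in-range, duplicate-free) set is full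
lemma eqPath_iff_full (X : Int) (hX : 1 ≤ X) (s : PySem.Set Int)
    (hnd : s.Nodup) (hsub : ∀ a ∈ s, 1 ≤ a ∧ a ≤ X) :
    pyListSetEqPath s (PySem.List.pyRange 1 (X + 1) 1) = true ↔ s.length = X.toNat := by
  have hlen : (PySem.List.pyRange 1 (X + 1) 1).length = X.toNat := by
    rw [PySem.List.length_pyRange_one]; omega
  constructor
  · intro h
    unfold pyListSetEqPath at h
    simp at h
    omega
  · intro h
    -- s ⊆ path, nodup, equal lengths ⇒ s is a permutation of the path
    have hsubset : s ⊆ PySem.List.pyRange 1 (X + 1) 1 := by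
      intro a ha
      rw [PySem.List.mem_pyRange_one]
      have := hsub a ha; omega
    have hperm : s.Perm (PySem.List.pyRange 1 (X + 1) 1) :=
      List.Subperm.perm_of_length_le (List.subperm_of_subset hnd hsubset) (by omega)
    unfold pyListSetEqPath
    rw [Bool.and_eq_true, beq_iff_eq, hlen, List.all_eq_true]
    refine ⟨h, fun x hx => ?_⟩
    simp only [PySem.Set.contains, List.contains_iff_mem]
    exact hperm.mem_iff.mpr hx

lemma loop_eq (X : Int) (hX : 1 ≤ X) :
    ∀ (rest : List (Int × Int)) (fallen : PySem.Set Int) (seen : List Bool) (remaining : Int),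
      (∀ a ∈ fallen, 1 ≤ a ∧ a ≤ X) →
      fallen.Nodup →
      (fallen.length : Int) < X →
      remaining = X - fallen.length →
      seen.length = (X + 1).toNat →
      (∀ a : Int, 1 ≤ a → a ≤ X → seen.getD a.toNat false = fallen.contains a) →
      aLoop (PySem.List.pyRange 1 (X + 1) 1) fallen rest = bLoop X seen remaining rest := by
  intro rest
  induction rest with
  | nil => intro fallen seen remaining _ _ _ _ _ _; rfl
  | cons p rest ih =>
    intro fallen seen remaining hsub hnd hlt hrem hslen hseen
    obtain ⟨sec, leaf⟩ := p
    by_cases hlr : 1 ≤ leaf ∧ leaf ≤ X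
    · -- in-range leaf
      have hguard : (leaf < 1 || leaf > X) = false := by
        simp; omega
      by_cases hmem : leaf ∈ fallen
      · -- already fallen: A's set does not change, comparison fails on length
        have hadd : PySem.Set.add fallen leaf = fallen := by
          simp [PySem.Set.add, hmem]
        have hcmp : pyListSetEqPath fallen (PySem.List.pyRange 1 (X + 1) 1) = false := by
          have := (eqPath_iff_full X hX fallen hnd hsub)
          rcases hb : pyListSetEqPath fallen (PySem.List.pyRange 1 (X + 1) 1) with _ | _
          · rfl
          · exfalso; have := this.mp hb; omega
        have hflag : seen.getD leaf.toNat false = true := by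
          rw [hseen leaf hlr.1 hlr.2]; simp [hmem]
        simp only [aLoop, bLoop, hadd, hcmp, hguard, hflag, Bool.false_eq_true, if_false,
          Bool.not_true]
        exact ih fallen seen remaining hsub hnd hlt hrem hslen hseen
      · -- new leaf
        have hadd : PySem.Set.add fallen leaf = fallen ++ [leaf] := by
          simp [PySem.Set.add, hmem]
        have hnd' : (fallen ++ [leaf]).Nodup := by
          simp [List.nodup_append, hnd]
          exact fun a ha h => hmem (h ▸ ha)
        have hsub' : ∀ a ∈ fallen ++ [leaf], 1 ≤ a ∧ a ≤ X := by
          intro a ha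
          rcases List.mem_append.mp ha with ha | ha
          · exact hsub a ha
          · simp at ha; omega
        have hflag : seen.getD leaf.toNat false = false := by
          rw [hseen leaf hlr.1 hlr.2]; simp [hmem]
        have hlen' : (fallen ++ [leaf]).length = fallen.length + 1 := by simp
        by_cases hfull : (fallen.length : Int) + 1 = X
        · -- the last leaf: both return sec
          have hcmp : pyListSetEqPath (fallen ++ [leaf]) (PySem.List.pyRange 1 (X + 1) 1) = true := by
            rw [eqPath_iff_full X hX _ hnd' hsub', hlen']; omega
          have hz : remaining - 1 = 0 := by omega
          simp only [aLoop, bLoop, hadd, hcmp, hguard, hflag, hz, Bool.false_eq_true, if_false,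
            Bool.not_false, if_true]
        · -- not full yet: both recurse
          have hcmp : pyListSetEqPath (fallen ++ [leaf]) (PySem.List.pyRange 1 (X + 1) 1) = false := by
            rcases hb : pyListSetEqPath (fallen ++ [leaf]) (PySem.List.pyRange 1 (X + 1) 1) with _ | _
            · rfl
            · exfalso
              have := (eqPath_iff_full X hX _ hnd' hsub').mp hb
              rw [hlen'] at this; omega
          have hz : ¬ (remaining - 1 = 0) := by omega
          simp only [aLoop, bLoop, hadd, hcmp, hguard, hflag, hz, Bool.false_eq_true, if_false,
            Bool.not_false, if_true]
          apply ih (fallen ++ [leaf]) (seen.set leaf.toNat true) (remaining - 1)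
            hsub' hnd' (by rw [hlen']; push_cast; omega) (by rw [hlen']; push_cast; omega)
            (by simp [hslen])
          intro a h1 h2
          by_cases hae : a = leaf
          · subst hae
            have hidx : a.toNat < seen.length := by omega
            rw [List.getD_eq_getElem?_getD, List.getElem?_set_self (by omega)]
            simp
          · have hne : a.toNat ≠ leaf.toNat := by omega
            rw [List.getD_eq_getElem?_getD, List.getElem?_set_ne (by omega),
              ← List.getD_eq_getElem?_getD, hseen a h1 h2]
            simp [hae]
    · -- out-of-range leaf: B returns -1; A's set is poisoned and never matches again
      have hguard : (leaf < 1 || leaf > X) = true := by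
        simp; omega
      have hmem : leaf ∉ fallen := fun h => hlr (hsub leaf h)
      have hmem' : leaf ∈ PySem.Set.add fallen leaf := by simp [PySem.Set.mem_add]
      have hout : leaf ∉ PySem.List.pyRange 1 (X + 1) 1 := by
        rw [PySem.List.mem_pyRange_one]; omega
      have hcmp : pyListSetEqPath (PySem.Set.add fallen leaf) (PySem.List.pyRange 1 (X + 1) 1) = false :=
        eqPath_false_of_bad _ _ (PySem.List.nodup_pyRange_one 1 (X+1)) leaf hmem' hout
      simp only [aLoop, bLoop, hcmp, hguard, Bool.false_eq_true, if_false, if_true]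
      exact aLoop_poison _ (PySem.List.nodup_pyRange_one 1 (X+1)) leaf hout rest _ hmem'

-- ===== VERDICT (by name: the statement is the Claim_ definition above) =====
theorem solution_old_spec : Claim_equal_solution_old := by
  intro X A _
  unfold Spec_solution_old solution_old solution_old_alt
  by_cases hX : X < 1
  · have hpath : PySem.List.pyRange 1 (X + 1) 1 = [] :=
      PySem.List.pyRange_one_eq_nil (by omega)
    simp only [hX, if_true, hpath]
    exact aLoop_nil_path _ _
  · simp only [hX, if_false]
    apply loop_eq X (by omega)
    · intro a ha; simp [PySem.Set.empty] at ha
    · simp [PySem.Set.empty]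
    · simp [PySem.Set.empty]; omega
    · simp [PySem.Set.empty]
    · simp
    · intro a h1 h2
      have : a.toNat < (X + 1).toNat := by omega
      simp [PySem.Set.empty, List.getD_eq_getElem?_getD, this]
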